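-- pv_equiv track=rewrite | github.com/Trevor-Ferris/Advent-of-Code-2024 | Aoc19/Aoc19p2.py | calc_permutations
-- ===== SOURCE A (Python) =====
-- def calc_permutations(towels: list[str], display: str, long_towel: int) -> int:
--     """
--     Runs through the display in reverse and adds the number of permutations at that point to a dict
--
--     Args:
--         towels: the list of towels
--         display: the current display string
--         long_towel: the length of the longest towel
--
--     Returns: The number of permutations of towels that can make the display
--     """
--     pos_dict = {}
--     for i in range(-1, - len(display) - 1, -1):
--         num_perm = 0
--         #If the entirety of the section of display is able to be
--         #made with a single towel add a permutation to this section
--         if display[i:] in towels: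
--             num_perm += 1
--         j = i + 1
--         #Run through possible sections (Shorter than the longest towel and not longer than the whole section)
--         while j < i + long_towel + 1 and j < 0:
--             #If the section can fit in the display then find the number of permutations of
--             #the remaining section and add it to this section
--             if display[i:j] in towels:
--                 num_perm += pos_dict[j]
--             j += 1
--         pos_dict[i] = num_perm
--     return pos_dict[- len(display)]
-- ===== SOURCE B (Python) =====
-- def calc_permutations(towels: list[str], display: str, long_towel: int) -> int:
--     """Event-driven (push/scatter) DP: walk the display left to right and, from
--     each position, propagate the tiling count forward by appending each usable
--     towel; a separate suffix pass accounts for the length-unrestricted final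
--     towel (as in the original, the last piece is checked whole against towels)."""
--     n = len(display)
--     towel_set = set(towels)
--     usable = [t for t in dict.fromkeys(towels) if t and len(t) <= long_towel]
--     ways = [1] + [0] * n
--     for s in range(n):
--         for t in usable:
--             e = s + len(t)
--             if display[s:e] == t:
--                 ways[e] += ways[s]
--     return sum(ways[s] for s in range(n) if display[s:] in towel_set)
-- ===== Notes on version B (the rewrite author's own statement) =====
-- stated objective: alternative
-- what changed: Replaces A's backward pull DP (for each suffix, scan a length window 1..long_towel and test slice membership in towels) by an event-driven push DP: towels are deduplicated and filtered once, then counts are scattered forward from each position by appending each usable towel (no length window, no membership test in the loop), with one suffix pass for the length-unrestricted final towel.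
-- outside the precondition, e.g. on calc_permutations([], '', 3): A raises KeyError, B returns 0
import Mathlib
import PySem

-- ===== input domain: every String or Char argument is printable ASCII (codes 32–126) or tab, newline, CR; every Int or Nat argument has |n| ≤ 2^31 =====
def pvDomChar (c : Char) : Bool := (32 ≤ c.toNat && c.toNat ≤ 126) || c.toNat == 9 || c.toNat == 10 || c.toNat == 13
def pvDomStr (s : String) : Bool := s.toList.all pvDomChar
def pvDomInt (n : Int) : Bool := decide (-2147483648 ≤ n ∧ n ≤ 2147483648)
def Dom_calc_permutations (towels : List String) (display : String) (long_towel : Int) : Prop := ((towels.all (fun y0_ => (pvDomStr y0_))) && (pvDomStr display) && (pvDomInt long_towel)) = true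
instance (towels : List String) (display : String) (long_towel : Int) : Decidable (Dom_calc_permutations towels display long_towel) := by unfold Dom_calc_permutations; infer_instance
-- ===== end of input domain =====

-- B replaces A's backward pull DP over a suffix dict by an event-driven push DP that scatters
-- counts forward over a deduplicated/filtered towel list, plus a final suffix pass (alternative).


-- ===== PORT A =====
-- the inner 'while j < i + long_towel + 1 and j < 0' loop; pos_dict[j] is ported as getD
-- (the loop only reads keys i+1..-1, which are always present when A runs)
def pvA_inner (towels : List String) (display : String) (long_towel i : Int)
    (pos_dict : PySem.Dict Int Int) (j num_perm : Int) : Int :=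
  if h : j < i + long_towel + 1 ∧ j < 0 then
    pvA_inner towels display long_towel i pos_dict (j + 1)
      (if towels.contains (PySem.Str.slice display (some i) (some j)) then
        num_perm + pos_dict.getD j 0 else num_perm)
  else num_perm
termination_by (-j).toNat
decreasing_by omega

def calc_permutations (towels : List String) (display : String) (long_towel : Int) : Int :=
  let pos_dict := (PySem.List.pyRange (-1) (-(PySem.Str.len display) - 1) (-1)).foldl
    (fun pos_dict i =>
      pos_dict.insert i (pvA_inner towels display long_towel i pos_dict (i + 1)
        (if towels.contains (PySem.Str.slice display (some i) none) then 0 + 1 else 0)))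
    PySem.Dict.empty
  -- pos_dict[-len(display)]: present whenever display ≠ "" (Pre_); KeyError otherwise
  pos_dict.getD (-(PySem.Str.len display)) 0

-- ===== PORT B =====
def calc_permutations_alt (towels : List String) (display : String) (long_towel : Int) : Int :=
  let n := PySem.Str.len display
  let towel_set := PySem.Set.ofList towels
  -- usable = [t for t in dict.fromkeys(towels) if t and len(t) <= long_towel]
  let usable := (PySem.List.dedup towels).filter
    (fun t => decide (t ≠ "") && decide (PySem.Str.len t ≤ long_towel))
  let ways := (PySem.List.pyRange 0 n 1).foldl
    (fun ways s =>
      usable.foldl (fun ways t =>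
        let e := s + PySem.Str.len t
        if PySem.Str.slice display (some s) (some e) = t then
          PySem.List.pySetD ways e (PySem.List.pyGetD ways e 0 + PySem.List.pyGetD ways s 0)
        else ways) ways)
    ([(1 : Int)] ++ List.replicate n.toNat 0)
  (PySem.List.pyRange 0 n 1).foldl
    (fun acc s =>
      if PySem.Set.contains towel_set (PySem.Str.slice display (some s) none) then
        acc + PySem.List.pyGetD ways s 0
      else acc) 0

-- ===== PRECONDITION & SPEC =====
-- Pre_ excludes only the empty display, on which A raises KeyError (pos_dict[0] on an empty dict).
def Pre_calc_permutations (towels : List String) (display : String) (long_towel : Int) : Prop :=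
  display ≠ ""
instance (towels : List String) (display : String) (long_towel : Int) : Decidable (Pre_calc_permutations towels display long_towel) := by unfold Pre_calc_permutations; infer_instance

def pvWitness_calc_permutations : List String × String × Int := (["a", "ab"], "aab", 2)

def Spec_calc_permutations (towels : List String) (display : String) (long_towel : Int) (out : Int) : Prop := out = calc_permutations_alt towels display long_towel
instance (towels : List String) (display : String) (long_towel : Int) (out : Int) : Decidable (Spec_calc_permutations towels display long_towel out) := by unfold Spec_calc_permutations; infer_instance

-- ===== CLAIM (what is proved, stated in full; the proofs are below) =====
def Claim_equal_calc_permutations : Prop := ∀ (towels : List String) (display : String) (long_towel : Int), Dom_calc_permutations towels display long_towel → Pre_calc_permutations towels display long_towel → Spec_calc_permutations towels display long_towel (calc_permutations towels display long_towel)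

-- ===== LEMMAS AND PROOFS =====

-- ---- shared mathematical layer ----
-- pvGl L e = 1 if a piece of length e is allowed inside the display (e ≤ long_towel)
def pvGl (L : Int) (e : Nat) : Int := if (e : Int) ≤ L then 1 else 0

-- pvW t l a b = 1 if the piece l[a:b) is a towel
def pvW (t : List String) (l : List Char) (a b : Nat) : Int :=
  if t.contains (String.ofList ((l.drop a).take (b - a))) then 1 else 0

-- pvSuf t l s = 1 if the whole suffix l[s:] is a towel
def pvSuf (t : List String) (l : List Char) (s : Nat) : Int :=
  if t.contains (String.ofList (l.drop s)) then 1 else 0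

-- pvH t l L d p: tilings of l[p:p+d) into towels of length ≤ L, split on the FIRST piece
def pvH (t : List String) (l : List Char) (L : Int) : Nat → Nat → Int
  | 0, _ => 1
  | d + 1, p => ∑ k ∈ Finset.range (d + 1),
      pvGl L (k + 1) * pvW t l p (p + (k + 1)) * pvH t l L (d - k) (p + (k + 1))
termination_by d _ => d
decreasing_by omega

-- pvF t l L d p: A's value for the suffix l[p:p+d) (last piece unrestricted, earlier ≤ L)
def pvF (t : List String) (l : List Char) (L : Int) : Nat → Nat → Int
  | 0, _ => 0
  | d + 1, p => pvSuf t l p + ∑ k ∈ Finset.range d,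
      pvGl L (k + 1) * pvW t l p (p + (k + 1)) * pvF t l L (d - k) (p + (k + 1))
termination_by d _ => d
decreasing_by omega

-- ---- generic sum helpers ----
lemma pv_sum_map_range (n : Nat) (f : Nat → Int) :
    ((List.range n).map f).sum = ∑ k ∈ Finset.range n, f k := by
  induction n with
  | zero => simp
  | succ n ih => simp [List.range_succ, Finset.sum_range_succ, ih]

lemma pv_foldl_guard {α : Type} (xs : List α) (c : α → Bool) (v : α → Int) (acc : Int) :
    xs.foldl (fun a x => if c x then a + v x else a) acc
      = acc + (xs.map (fun x => if c x then v x else 0)).sum := by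
  induction xs generalizing acc with
  | nil => simp
  | cons x xs ih =>
    simp only [List.foldl_cons, List.map_cons, List.sum_cons]
    by_cases h : c x <;> simp [h, ih] <;> ring

lemma pv_sum_range_if (n m : Nat) (f : Nat → Int) (h : m ≤ n) :
    ∑ k ∈ Finset.range n, (if k < m then f k else 0) = ∑ k ∈ Finset.range m, f k := by
  induction n with
  | zero => simp [show m = 0 by omega]
  | succ n ih =>
    rw [Finset.sum_range_succ]
    by_cases hm : m ≤ n
    · rw [ih hm, if_neg (by omega), add_zero]
    · have hm1 : m = n + 1 := by omega
      subst hm1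
      rw [Finset.sum_range_succ, if_pos (by omega)]
      congr 1
      exact Finset.sum_congr rfl (fun k hk => if_pos (by have := Finset.mem_range.mp hk; omega))

lemma pv_sum_range_shift (n m : Nat) (g : Nat → Int) :
    ∑ k ∈ Finset.range n, (if m ≤ k then g k else 0) = ∑ s ∈ Finset.range (n - m), g (m + s) := by
  induction n with
  | zero => simp
  | succ n ih =>
    rw [Finset.sum_range_succ, ih]
    by_cases h : m ≤ n
    · rw [if_pos h, show n + 1 - m = (n - m) + 1 by omega, Finset.sum_range_succ,
        show m + (n - m) = n by omega]
    · rw [if_neg h, show n + 1 - m = 0 by omega, show n - m = 0 by omega]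
      simp

lemma pv_tri_comm (n : Nat) (f : Nat → Nat → Int) :
    ∑ k ∈ Finset.range n, ∑ m ∈ Finset.range (n - k), f k m
      = ∑ m ∈ Finset.range n, ∑ k ∈ Finset.range (n - m), f k m := by
  calc ∑ k ∈ Finset.range n, ∑ m ∈ Finset.range (n - k), f k m
      = ∑ k ∈ Finset.range n, ∑ m ∈ Finset.range n, (if m < n - k then f k m else 0) :=
        Finset.sum_congr rfl (fun k _ => (pv_sum_range_if n (n - k) (f k) (by omega)).symm)
    _ = ∑ m ∈ Finset.range n, ∑ k ∈ Finset.range n, (if m < n - k then f k m else 0) :=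
        Finset.sum_comm
    _ = ∑ m ∈ Finset.range n, ∑ k ∈ Finset.range n, (if k < n - m then f k m else 0) := by
        apply Finset.sum_congr rfl; intro m hm
        apply Finset.sum_congr rfl; intro k hk
        have hm' := Finset.mem_range.mp hm
        have hk' := Finset.mem_range.mp hk
        exact if_congr (by omega) rfl rfl
    _ = ∑ m ∈ Finset.range n, ∑ k ∈ Finset.range (n - m), f k m :=
        Finset.sum_congr rfl (fun m _ => pv_sum_range_if n (n - m) (fun k => f k m) (by omega))

lemma pv_sum_gl (L : Int) (m : Nat) (f : Nat → Int) :
    ∑ k ∈ Finset.range ((min L (m : Int)).toNat), f k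
      = ∑ k ∈ Finset.range m, pvGl L (k + 1) * f k := by
  have hM : (min L (m : Int)).toNat ≤ m := by
    have := min_le_right L (m : Int); omega
  rw [← pv_sum_range_if m ((min L (m : Int)).toNat) f hM]
  apply Finset.sum_congr rfl
  intro k hk
  have hk' : k < m := Finset.mem_range.mp hk
  have key : (((k + 1 : Nat) : Int) ≤ L) ↔ k < (min L (m : Int)).toNat := by
    rcases le_total L (m : Int) with hc | hc
    · rw [min_eq_left hc]; push_cast; omega
    · rw [min_eq_right hc]; push_cast; omega
  by_cases h2 : ((k + 1 : Nat) : Int) ≤ L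
  · unfold pvGl; rw [if_pos (key.mp h2), if_pos h2, one_mul]
  · unfold pvGl; rw [if_neg (fun hh => h2 (key.mpr hh)), if_neg h2, zero_mul]

-- ---- the directional bridge: pvH also satisfies the LAST-piece recurrence ----
lemma pvH_last (t : List String) (l : List Char) (L : Int) :
    ∀ d p, pvH t l L (d + 1) p
      = ∑ k ∈ Finset.range (d + 1),
          pvGl L (k + 1) * pvW t l (p + d - k) (p + d + 1) * pvH t l L (d - k) p := by
  intro d
  induction d using Nat.strong_induction_on with
  | _ d ih =>
  intro p
  match d with
  | 0 => simp [pvH]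
  | Nat.succ e =>
    have key := pv_tri_comm (e + 1) (fun k m =>
      pvGl L (k + 1) * pvGl L (m + 1) * pvW t l p (p + (k + 1)) * pvW t l (p + e + 1 - m) (p + e + 2)
        * pvH t l L (e - k - m) (p + (k + 1)))
    have hL : pvH t l L (e + 1 + 1) p
        = pvGl L (e + 2) * pvW t l p (p + (e + 2))
          + ∑ k ∈ Finset.range (e + 1), ∑ m ∈ Finset.range (e + 1 - k),
              pvGl L (k + 1) * pvGl L (m + 1) * pvW t l p (p + (k + 1))
                * pvW t l (p + e + 1 - m) (p + e + 2) * pvH t l L (e - k - m) (p + (k + 1)) := by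
      rw [pvH, Finset.sum_range_succ, add_comm]
      congr 1
      · rw [show e + 1 - (e + 1) = 0 from by omega, show pvH t l L 0 (p + (e + 1 + 1)) = 1 from by simp [pvH],
          mul_one, show e + 1 + 1 = e + 2 from by omega]
      · apply Finset.sum_congr rfl
        intro k hk
        have hk' : k < e + 1 := Finset.mem_range.mp hk
        rw [show e + 1 - k = (e - k) + 1 from by omega, ih (e - k) (by omega) (p + (k + 1)),
          Finset.mul_sum, show (e - k) + 1 = e + 1 - k from by omega]
        apply Finset.sum_congr rfl
        intro m hm
        rw [show p + (k + 1) + (e - k) - m = p + e + 1 - m from by omega,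
          show p + (k + 1) + (e - k) + 1 = p + e + 2 from by omega]
        ring
    have hR : ∑ k ∈ Finset.range (e + 1 + 1),
          pvGl L (k + 1) * pvW t l (p + (e + 1) - k) (p + (e + 1) + 1) * pvH t l L (e + 1 - k) p
        = pvGl L (e + 2) * pvW t l p (p + (e + 2))
          + ∑ m ∈ Finset.range (e + 1), ∑ k ∈ Finset.range (e + 1 - m),
              pvGl L (k + 1) * pvGl L (m + 1) * pvW t l p (p + (k + 1))
                * pvW t l (p + e + 1 - m) (p + e + 2) * pvH t l L (e - k - m) (p + (k + 1)) := by
      rw [Finset.sum_range_succ, add_comm]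
      congr 1
      · rw [show e + 1 - (e + 1) = 0 from by omega, show pvH t l L 0 p = 1 from by simp [pvH],
          mul_one, show p + (e + 1) - (e + 1) = p from by omega,
          show p + (e + 1) + 1 = p + (e + 2) from by omega, show e + 1 + 1 = e + 2 from by omega]
      · apply Finset.sum_congr rfl
        intro m hm
        have hm' : m < e + 1 := Finset.mem_range.mp hm
        rw [show e + 1 - m = (e - m) + 1 from by omega, pvH, Finset.mul_sum,
          show (e - m) + 1 = e + 1 - m from by omega]
        apply Finset.sum_congr rfl
        intro k hk
        have hk' : k < e + 1 - m := Finset.mem_range.mp hk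
        rw [show e - m - k = e - k - m from by omega,
          show p + (e + 1) - m = p + e + 1 - m from by omega,
          show p + (e + 1) + 1 = p + e + 2 from by omega]
        ring
    rw [hL, hR, key]

-- pvH via the LAST-piece start index j (reflection of pvH_last at p = 0)
lemma pvH_last_start (t : List String) (l : List Char) (L : Int) (p : Nat) :
    pvH t l L (p + 1) 0
      = ∑ j ∈ Finset.range (p + 1), pvGl L (p + 1 - j) * pvW t l j (p + 1) * pvH t l L j 0 := by
  rw [pvH_last t l L p 0]
  rw [← Finset.sum_range_reflect (fun j => pvGl L (p + 1 - j) * pvW t l j (p + 1) * pvH t l L j 0) (p + 1)]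
  apply Finset.sum_congr rfl
  intro k hk
  have hk' : k < p + 1 := Finset.mem_range.mp hk
  rw [show p + 1 - 1 - k = p - k from by omega, show p + 1 - (p - k) = k + 1 from by omega,
    show (0 : Nat) + p - k = p - k from by omega, show (0 : Nat) + p + 1 = p + 1 from by omega]

-- ---- grouping: A's suffix value = sum over the start of the last piece ----
lemma pvF_group (t : List String) (l : List Char) (L : Int) :
    ∀ d p, pvF t l L d p = ∑ s ∈ Finset.range d, pvSuf t l (p + s) * pvH t l L s p := by
  intro d
  induction d using Nat.strong_induction_on with
  | _ d ih =>
  intro p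
  match d with
  | 0 => simp [pvF]
  | Nat.succ e =>
    rw [pvF, Finset.sum_range_succ',
      show pvSuf t l (p + 0) * pvH t l L 0 p = pvSuf t l p from by simp [pvH], add_comm _ (pvSuf t l p)]
    congr 1
    calc ∑ k ∈ Finset.range e,
            pvGl L (k + 1) * pvW t l p (p + (k + 1)) * pvF t l L (e - k) (p + (k + 1))
        = ∑ k ∈ Finset.range e, ∑ s' ∈ Finset.range (e - k),
            pvGl L (k + 1) * pvW t l p (p + (k + 1))
              * (pvSuf t l (p + ((k + s') + 1)) * pvH t l L ((k + s') - k) (p + (k + 1))) := by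
          apply Finset.sum_congr rfl
          intro k hk
          rw [ih (e - k) (by omega) (p + (k + 1)), Finset.mul_sum]
          apply Finset.sum_congr rfl
          intro s' hs'
          rw [show (k + s') - k = s' from by omega,
            show p + ((k + s') + 1) = p + (k + 1) + s' from by omega]
      _ = ∑ k ∈ Finset.range e, ∑ σ ∈ Finset.range e,
            (if k ≤ σ then pvGl L (k + 1) * pvW t l p (p + (k + 1))
              * (pvSuf t l (p + (σ + 1)) * pvH t l L (σ - k) (p + (k + 1))) else 0) := by
          apply Finset.sum_congr rfl
          intro k hk
          exact (pv_sum_range_shift e k (fun σ => pvGl L (k + 1) * pvW t l p (p + (k + 1))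
            * (pvSuf t l (p + (σ + 1)) * pvH t l L (σ - k) (p + (k + 1))))).symm
      _ = ∑ σ ∈ Finset.range e, ∑ k ∈ Finset.range e,
            (if k < σ + 1 then pvGl L (k + 1) * pvW t l p (p + (k + 1))
              * (pvSuf t l (p + (σ + 1)) * pvH t l L (σ - k) (p + (k + 1))) else 0) := by
          rw [Finset.sum_comm]
          exact Finset.sum_congr rfl (fun σ _ => Finset.sum_congr rfl
            (fun k _ => if_congr (by omega) rfl rfl))
      _ = ∑ σ ∈ Finset.range e, pvSuf t l (p + (σ + 1)) * pvH t l L (σ + 1) p := by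
          apply Finset.sum_congr rfl
          intro σ hσ
          have hσ' : σ < e := Finset.mem_range.mp hσ
          rw [pv_sum_range_if e (σ + 1) _ (by omega), pvH, Finset.mul_sum]
          apply Finset.sum_congr rfl
          intro k hk
          ring

-- ---- port-to-math lemmas ----
lemma pv_contains_ofList (towels : List String) (x : String) :
    PySem.Set.contains (PySem.Set.ofList towels) x = towels.contains x := by
  rw [Bool.eq_iff_iff]
  simp only [PySem.Set.contains, List.contains_iff_mem, PySem.Set.mem_ofList]

-- slice normal forms
lemma pv_slice_nat (s : String) (a b : Nat) :
    PySem.Str.slice s (some (a : Int)) (some (b : Int))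
      = String.ofList ((s.toList.drop a).take (b - a)) := by
  simp only [PySem.Str.slice, PySem.Chars.slice_eq_listSlice, PySem.List.slice_natCast]

lemma pv_slice_from (s : String) (a : Nat) :
    PySem.Str.slice s (some (a : Int)) none = String.ofList (s.toList.drop a) := by
  simp only [PySem.Str.slice, PySem.Chars.slice_eq_listSlice, PySem.List.slice_from_natCast]

lemma pv_slice_from_neg (s : String) (k : Nat) (hk : 0 < k) :
    PySem.Str.slice s (some (-(k : Int))) none
      = String.ofList (s.toList.drop (s.toList.length - k)) := by
  simp only [PySem.Str.slice, PySem.Chars.slice_eq_listSlice,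
    PySem.List.slice_from_neg_natCast _ k hk]

lemma pv_slice_neg_pair (s : String) (k q : Nat) (hk : 0 < k) (hq : 0 < q) :
    PySem.Str.slice s (some (-(k : Int))) (some (-(q : Int)))
      = String.ofList ((s.toList.drop (s.toList.length - k)).take
          ((s.toList.length - q) - (s.toList.length - k))) := by
  simp only [PySem.Str.slice, PySem.Chars.slice_eq_listSlice, PySem.List.slice,
    PySem.List.clampIdx_neg_natCast _ k hk, PySem.List.clampIdx_neg_natCast _ q hq]

lemma pvA_inner_eq (towels : List String) (display : String) (long_towel i : Int)
    (D : PySem.Dict Int Int) :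
    ∀ j acc, pvA_inner towels display long_towel i D j acc
      = acc + ((PySem.List.pyRange j (min (i + long_towel + 1) 0) 1).map
          (fun jj => if towels.contains (PySem.Str.slice display (some i) (some jj)) then
            D.getD jj 0 else 0)).sum := by
  intro j acc
  induction j, acc using pvA_inner.induct towels display long_towel i D with
  | case1 j acc h ih =>
    simp only [dite_eq_ite] at ih
    rw [pvA_inner, dif_pos h, ih,
      PySem.List.pyRange_one_cons (lt_min h.1 h.2), List.map_cons, List.sum_cons]
    split_ifs <;> ring
  | case2 j acc h =>
    have hj : min (i + long_towel + 1) 0 ≤ j := by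
      rcases not_and_or.mp h with h1 | h1
      · exact le_trans (min_le_left _ _) (by omega)
      · exact le_trans (min_le_right _ _) (by omega)
    rw [pvA_inner, dif_neg h, PySem.List.pyRange_one_eq_nil hj]
    simp

-- ---- B-side: the push/scatter table ----

-- one element of a Nodup list can satisfy a predicate forcing its value
lemma pv_countP_unique {α : Type} [DecidableEq α] (p : α → Bool) (u0 : α)
    (hp : ∀ u, p u = true → u = u0) :
    ∀ us : List α, us.Nodup → us.countP p = if u0 ∈ us ∧ p u0 then 1 else 0 := by
  intro us
  induction us with
  | nil => simp
  | cons a us ih =>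
    intro hnd
    obtain ⟨hna, hnd'⟩ := List.nodup_cons.mp hnd
    rw [List.countP_cons, ih hnd']
    by_cases ha : p a = true
    · have haa : a = u0 := hp a ha
      subst haa
      simp [ha, hna]
    · by_cases hm : u0 ∈ us ∧ p u0 = true
      · have hne : a ≠ u0 := fun h => ha (h ▸ hm.2)
        simp [ha, hm.1, hm.2]
      · have h3 : ¬(u0 ∈ a :: us ∧ p u0 = true) := by
          rintro ⟨hmem, hpu⟩
          rcases List.mem_cons.mp hmem with h4 | h4
          · exact ha (h4 ▸ hpu)
          · exact hm ⟨h4, hpu⟩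
        rw [if_neg hm, if_neg h3, if_neg ha, Nat.add_zero]

-- getD after set
lemma pv_getD_set (ws : List Int) (e k : Nat) (v : Int) (he : e < ws.length) :
    (ws.set e v).getD k 0 = if k = e then v else ws.getD k 0 := by
  rw [List.getD_eq_getElem?_getD, List.getD_eq_getElem?_getD, List.getElem?_set]
  by_cases h : k = e
  · simp [h, he]
  · rw [if_neg (fun hh => h hh.symm), if_neg h]

-- the inner fold (over usable towels) adds countP·ways[s] at each index k
lemma pvB_inner (display : String) (s : Nat) (hs : s ≤ display.toList.length) :
    ∀ (us : List String) (ws : List Int),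
    (∀ u ∈ us, u ≠ "") → ws.length = display.toList.length + 1 →
    ∀ k : Nat, k ≤ display.toList.length →
    (us.foldl (fun ways t =>
        if PySem.Str.slice display (some (s : Int)) (some ((s : Int) + PySem.Str.len t)) = t then
          PySem.List.pySetD ways ((s : Int) + PySem.Str.len t)
            (PySem.List.pyGetD ways ((s : Int) + PySem.Str.len t) 0
              + PySem.List.pyGetD ways (s : Int) 0)
        else ways) ws).getD k 0
      = ws.getD k 0
        + (us.countP (fun u =>
            decide (s + u.toList.length = k) &&
            decide (PySem.Str.slice display (some (s : Int)) (some ((s : Int) + PySem.Str.len u)) = u)) : Int)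
          * ws.getD s 0 := by
  intro us
  induction us with
  | nil => intro ws _ _ k _; simp
  | cons u us ih =>
    intro ws hne hlen k hk
    rw [List.foldl_cons, List.countP_cons]
    have hlu : PySem.Str.len u = ((u.toList.length : Nat) : Int) := PySem.Str.len_eq u
    have hcast : (s : Int) + PySem.Str.len u = ((s + u.toList.length : Nat) : Int) := by
      rw [hlu]; push_cast; ring
    by_cases hc : PySem.Str.slice display (some (s : Int)) (some ((s : Int) + PySem.Str.len u)) = u
    · -- matched: a real set at index e = s + |u|
      have hu1 : 1 ≤ u.toList.length := by
        rcases Nat.eq_zero_or_pos u.toList.length with h0 | h0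
        · exfalso
          apply hne u (List.mem_cons_self)
          have : u.toList = [] := List.length_eq_zero_iff.mp h0
          calc u = String.ofList u.toList := (String.ofList_toList).symm
            _ = "" := by rw [this]
        · omega
      set e := s + u.toList.length with hedef
      have hslice : ((display.toList.drop s).take (e - s)) = u.toList := by
        have := hc
        rw [hcast, pv_slice_nat display s e] at this
        have := congrArg String.toList this
        simpa using this
      have he : e ≤ display.toList.length := by
        have hlen2 := congrArg List.length hslice
        rw [List.length_take, List.length_drop] at hlen2
        omega
      have helt : e < ws.length := by omega
      rw [if_pos hc]
      set v := ws.getD e 0 + ws.getD s 0 with hvdef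
      have harg : PySem.List.pySetD ws ((s : Int) + PySem.Str.len u)
          (PySem.List.pyGetD ws ((s : Int) + PySem.Str.len u) 0
            + PySem.List.pyGetD ws (s : Int) 0) = ws.set e v := by
        rw [hcast]
        simp [PySem.List.pySetD_natCast, PySem.List.pyGetD_natCast, hvdef]
      rw [harg]
      have hlen' : (ws.set e v).length = display.toList.length + 1 := by
        rw [List.length_set]; exact hlen
      rw [ih (ws.set e v) (fun x hx => hne x (List.mem_cons_of_mem _ hx)) hlen' k hk]
      have hse : s ≠ e := by omega
      have hgs : (ws.set e v).getD s 0 = ws.getD s 0 := by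
        rw [pv_getD_set ws e s v helt, if_neg hse]
      rw [hgs, pv_getD_set ws e k v helt]
      by_cases hke : k = e
      · rw [if_pos hke, if_pos (by
          simp only [Bool.and_eq_true, decide_eq_true_eq]
          exact ⟨by omega, hc⟩)]
        subst hke
        push_cast
        rw [hvdef]
        ring
      · rw [if_neg hke, if_neg (by
          simp only [Bool.and_eq_true, decide_eq_true_eq]
          rintro ⟨h1, _⟩
          exact hke h1.symm)]
        push_cast
        ring
    · rw [if_neg hc, ih ws (fun x hx => hne x (List.mem_cons_of_mem _ hx)) hlen k hk,
        if_neg (by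
          simp only [Bool.and_eq_true, decide_eq_true_eq]
          rintro ⟨_, h2⟩
          exact hc h2)]
      push_cast
      ring

-- length is preserved by the inner fold
lemma pvB_inner_len (display : String) (s : Int) (us : List String) (ws : List Int) :
    (us.foldl (fun ways t =>
        if PySem.Str.slice display (some s) (some (s + PySem.Str.len t)) = t then
          PySem.List.pySetD ways (s + PySem.Str.len t)
            (PySem.List.pyGetD ways (s + PySem.Str.len t) 0 + PySem.List.pyGetD ways s 0)
        else ways) ws).length = ws.length := by
  induction us generalizing ws with
  | nil => rfl
  | cons u us ih =>
    rw [List.foldl_cons]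
    by_cases hc : PySem.Str.slice display (some s) (some (s + PySem.Str.len u)) = u
    · rw [if_pos hc, ih, PySem.List.length_pySetD]
    · rw [if_neg hc, ih]

-- the countP equals pvGl·pvW for p < k ≤ n, and 0 for k ≤ p
lemma pvB_cnt (towels : List String) (display : String) (L : Int) (p k : Nat)
    (hk : k ≤ display.toList.length) :
    (((PySem.List.dedup towels).filter
        (fun t => decide (t ≠ "") && decide (PySem.Str.len t ≤ L))).countP (fun u =>
          decide (p + u.toList.length = k) &&
          decide (PySem.Str.slice display (some (p : Int)) (some ((p : Int) + PySem.Str.len u)) = u)) : Int)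
      = if p < k then pvGl L (k - p) * pvW towels display.toList p k else 0 := by
  have hnd : ((PySem.List.dedup towels).filter
      (fun t => decide (t ≠ "") && decide (PySem.Str.len t ≤ L))).Nodup :=
    (PySem.List.nodup_dedup towels).filter _
  have hp' : ∀ u, (decide (p + u.toList.length = k) &&
      decide (PySem.Str.slice display (some (p : Int)) (some ((p : Int) + PySem.Str.len u)) = u))
        = true → u = String.ofList ((display.toList.drop p).take (k - p)) := by
    intro u hu
    simp only [Bool.and_eq_true, decide_eq_true_eq] at hu
    obtain ⟨h1, h2⟩ := hu
    rw [PySem.Str.len_eq,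
      show ((p : Int) + ((u.toList.length : Nat) : Int)) = ((p + u.toList.length : Nat) : Int) from by
        push_cast; ring,
      h1, pv_slice_nat display p k] at h2
    exact h2.symm
  rw [pv_countP_unique _ (String.ofList ((display.toList.drop p).take (k - p))) hp' _ hnd]
  have hmemiff : (String.ofList ((display.toList.drop p).take (k - p)) ∈ (PySem.List.dedup towels).filter
      (fun t => decide (t ≠ "") && decide (PySem.Str.len t ≤ L)))
      ↔ (String.ofList ((display.toList.drop p).take (k - p)) ∈ towels
          ∧ String.ofList ((display.toList.drop p).take (k - p)) ≠ ""
          ∧ PySem.Str.len (String.ofList ((display.toList.drop p).take (k - p))) ≤ L) := by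
    rw [List.mem_filter, PySem.List.mem_dedup]
    simp only [Bool.and_eq_true, decide_eq_true_eq]
  by_cases hpk : p < k
  · have hlen0 : (String.ofList ((display.toList.drop p).take (k - p))).toList.length = k - p := by
      simp only [String.toList_ofList, List.length_take, List.length_drop]
      omega
    have hne0 : String.ofList ((display.toList.drop p).take (k - p)) ≠ "" := by
      intro h0
      have h2 : ((display.toList.drop p).take (k - p)) = [] := by
        simpa using congrArg String.toList h0
      have h3 := congrArg List.length h2
      simp only [List.length_take, List.length_drop, List.length_nil] at h3
      omega
    have hpred : (decide (p + (String.ofList ((display.toList.drop p).take (k - p))).toList.length = k) &&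
        decide (PySem.Str.slice display (some (p : Int))
          (some ((p : Int) + PySem.Str.len (String.ofList ((display.toList.drop p).take (k - p)))))
          = String.ofList ((display.toList.drop p).take (k - p)))) = true := by
      simp only [Bool.and_eq_true, decide_eq_true_eq]
      refine ⟨by omega, ?_⟩
      rw [PySem.Str.len_eq, hlen0,
        show ((p : Int) + ((k - p : Nat) : Int)) = ((k : Nat) : Int) from by push_cast; omega,
        pv_slice_nat display p k]
    rw [if_pos hpk]
    unfold pvGl pvW
    by_cases hmem : String.ofList ((display.toList.drop p).take (k - p)) ∈ towels
    · by_cases hL : ((k - p : Nat) : Int) ≤ L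
      · rw [if_pos ⟨hmemiff.mpr ⟨hmem, hne0, by rw [PySem.Str.len_eq, hlen0]; exact_mod_cast hL⟩, hpred⟩,
          if_pos hL, if_pos (List.contains_iff_mem.mpr hmem)]
        norm_num
      · rw [if_neg (by
            rintro ⟨hmem2, _⟩
            exact hL (by have := (hmemiff.mp hmem2).2.2; rwa [PySem.Str.len_eq, hlen0] at this)),
          if_neg hL]
        norm_num
    · rw [if_neg (by rintro ⟨hmem2, _⟩; exact hmem (hmemiff.mp hmem2).1),
        if_neg (fun hc => hmem (List.contains_iff_mem.mp hc))]
      norm_num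
  · have hu0e : String.ofList ((display.toList.drop p).take (k - p)) = "" := by
      rw [show k - p = 0 from by omega]
      simp
    rw [if_neg hpk, if_neg (by
      rintro ⟨hmem2, _⟩
      exact (hmemiff.mp hmem2).2.1 hu0e)]
    norm_num

-- the outer fold builds the pvH table
lemma pvB_table (towels : List String) (display : String) (L : Int)
    (us : List String) (hus : us = (PySem.List.dedup towels).filter
      (fun t => decide (t ≠ "") && decide (PySem.Str.len t ≤ L))) :
    ∀ p : Nat, p ≤ display.toList.length →
    ∀ k : Nat, k ≤ display.toList.length →
    ((PySem.List.pyRange 0 (p : Int) 1).foldl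
      (fun ways s =>
        us.foldl (fun ways t =>
          if PySem.Str.slice display (some s) (some (s + PySem.Str.len t)) = t then
            PySem.List.pySetD ways (s + PySem.Str.len t)
              (PySem.List.pyGetD ways (s + PySem.Str.len t) 0 + PySem.List.pyGetD ways s 0)
          else ways) ways)
      ([(1 : Int)] ++ List.replicate display.toList.length 0)).getD k 0
    = if k ≤ p then pvH towels display.toList L k 0
      else ∑ j ∈ Finset.range p,
        pvGl L (k - j) * pvW towels display.toList j k * pvH towels display.toList L j 0 := by
  have husne : ∀ u ∈ us, u ≠ "" := by
    intro u hu
    rw [hus, List.mem_filter] at hu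
    simp only [Bool.and_eq_true, decide_eq_true_eq] at hu
    exact hu.2.1
  intro p
  induction p with
  | zero =>
    intro _ k hk
    rw [show ((0 : Nat) : Int) = 0 from rfl, PySem.List.pyRange_one_eq_nil le_rfl, List.foldl_nil]
    cases k with
    | zero => simp [pvH]
    | succ k =>
      rw [if_neg (by omega), List.cons_append, List.nil_append, List.getD_cons_succ]
      rw [List.getD_eq_getElem?_getD, List.getElem?_replicate,
        Finset.range_zero, Finset.sum_empty]
      split <;> rfl
  | succ p ih =>
    intro hp k hk
    have hp' : p ≤ display.toList.length := by omega
    rw [show (((p + 1 : Nat)) : Int) = ((p : Nat) : Int) + 1 from by push_cast; ring,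
      PySem.List.pyRange_one_succ_right (by positivity), List.foldl_append, List.foldl_cons,
      List.foldl_nil]
    have hWlen : ∀ (ss : List Int) (ws : List Int),
        (ss.foldl (fun ways s =>
          us.foldl (fun ways t =>
            if PySem.Str.slice display (some s) (some (s + PySem.Str.len t)) = t then
              PySem.List.pySetD ways (s + PySem.Str.len t)
                (PySem.List.pyGetD ways (s + PySem.Str.len t) 0 + PySem.List.pyGetD ways s 0)
            else ways) ways) ws).length = ws.length := by
      intro ss
      induction ss with
      | nil => intro ws; rfl
      | cons s0 ss ihs => intro ws; rw [List.foldl_cons, ihs, pvB_inner_len]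
    have hlen1 : ((PySem.List.pyRange 0 ((p : Nat) : Int) 1).foldl
        (fun ways s =>
          us.foldl (fun ways t =>
            if PySem.Str.slice display (some s) (some (s + PySem.Str.len t)) = t then
              PySem.List.pySetD ways (s + PySem.Str.len t)
                (PySem.List.pyGetD ways (s + PySem.Str.len t) 0 + PySem.List.pyGetD ways s 0)
            else ways) ways)
        ([(1 : Int)] ++ List.replicate display.toList.length 0)).length
        = display.toList.length + 1 := by
      rw [hWlen]
      simp
    rw [pvB_inner display p hp' us _ husne hlen1 k hk]
    rw [ih hp' k hk, ih hp' p (by omega), if_pos (le_refl p)]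
    rw [hus, pvB_cnt towels display L p k hk]
    by_cases h1 : k ≤ p
    · rw [if_pos h1, if_pos (show k ≤ p + 1 from by omega), if_neg (show ¬ p < k from by omega)]
      ring
    · by_cases h2 : k = p + 1
      · subst h2
        rw [if_neg h1, if_pos (le_refl (p + 1)), if_pos (show p < p + 1 from by omega)]
        rw [pvH_last_start towels display.toList L p, Finset.sum_range_succ,
          show p + 1 - p = 1 from by omega]
      · rw [if_neg h1, if_neg (show ¬ k ≤ p + 1 from by omega),
          if_pos (show p < k from by omega), Finset.sum_range_succ]

-- B's port value: the final suffix pass over the finished table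
lemma pvB_final (t : List String) (disp : String) (L : Int) (W : List Int)
    (hW : ∀ k : Nat, k ≤ disp.toList.length → W.getD k 0 = pvH t disp.toList L k 0) :
    (PySem.List.pyRange 0 ((disp.toList.length : Nat) : Int) 1).foldl
      (fun acc s =>
        if PySem.Set.contains (PySem.Set.ofList t) (PySem.Str.slice disp (some s) none) then
          acc + PySem.List.pyGetD W s 0
        else acc) 0
      = ∑ s ∈ Finset.range disp.toList.length,
          pvSuf t disp.toList s * pvH t disp.toList L s 0 := by
  rw [pv_foldl_guard, zero_add, PySem.List.pyRange_one, List.map_map, pv_sum_map_range]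
  rw [show (((disp.toList.length : Nat) : Int) - 0).toNat = disp.toList.length from by omega]
  apply Finset.sum_congr rfl
  intro k hk
  have hk' := Finset.mem_range.mp hk
  simp only [Function.comp]
  rw [show (0 : Int) + (k : Int) = ((k : Nat) : Int) from by push_cast; ring]
  rw [PySem.List.pyGetD_natCast, hW k (by omega)]
  rw [pv_slice_from disp k, pv_contains_ofList]
  unfold pvSuf
  split_ifs <;> ring

lemma pvB_eq (t : List String) (disp : String) (L : Int) :
    calc_permutations_alt t disp L
      = ∑ s ∈ Finset.range disp.toList.length,
          pvSuf t disp.toList s * pvH t disp.toList L s 0 := by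
  simp only [calc_permutations_alt]
  rw [show PySem.Str.len disp = ((disp.toList.length : Nat) : Int) from PySem.Str.len_eq disp]
  rw [Int.toNat_natCast]
  exact pvB_final t disp L _ (fun k hk => by
    rw [pvB_table t disp L _ rfl disp.toList.length le_rfl k hk, if_pos hk])

-- A's inner while-loop value at suffix start -(m+1)
lemma pvA_value (t : List String) (disp : String) (L : Int) (m : Nat)
    (hm : m + 1 ≤ disp.toList.length) (D : PySem.Dict Int Int)
    (hD : ∀ k : Nat, 1 ≤ k → k ≤ m →
      D.get? (-(k : Int)) = some (pvF t disp.toList L k (disp.toList.length - k))) :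
    pvA_inner t disp L (-((m + 1 : Nat) : Int)) D (-((m + 1 : Nat) : Int) + 1)
      (if t.contains (PySem.Str.slice disp (some (-((m + 1 : Nat) : Int))) none) then 0 + 1 else 0)
    = pvF t disp.toList L (m + 1) (disp.toList.length - (m + 1)) := by
  rw [pvA_inner_eq]
  rw [pv_slice_from_neg disp (m + 1) (by omega)]
  rw [show (-((m + 1 : Nat) : Int) + 1) = -((m : Nat) : Int) from by push_cast; ring]
  rw [PySem.List.pyRange_one, List.map_map, pv_sum_map_range]
  rw [show (min (-((m + 1 : Nat) : Int) + L + 1) 0 - -((m : Nat) : Int)).toNat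
      = (min L ((m : Nat) : Int)).toNat from by
    rcases le_total L ((m : Nat) : Int) with hc | hc
    · rw [min_eq_left (by push_cast; omega), min_eq_left hc]; push_cast; omega
    · rw [min_eq_right (by push_cast; omega), min_eq_right hc]; push_cast; omega]
  have hM : (min L ((m : Nat) : Int)).toNat ≤ m := by
    have := min_le_right L ((m : Nat) : Int); omega
  calc (if t.contains (String.ofList (disp.toList.drop (disp.toList.length - (m + 1)))) then
          (0 : Int) + 1 else 0) + _
      = pvSuf t disp.toList (disp.toList.length - (m + 1))
        + ∑ k ∈ Finset.range ((min L ((m : Nat) : Int)).toNat),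
            pvW t disp.toList (disp.toList.length - (m + 1))
                (disp.toList.length - (m + 1) + (k + 1))
              * pvF t disp.toList L (m - k) (disp.toList.length - (m + 1) + (k + 1)) := by
        congr 1
        · apply Finset.sum_congr rfl
          intro k hk
          have hk' := Finset.mem_range.mp hk
          simp only [Function.comp]
          rw [show -((m : Nat) : Int) + (k : Int) = -(((m - k : Nat)) : Int) from by push_cast; omega]
          rw [pv_slice_neg_pair disp (m + 1) (m - k) (by omega) (by omega)]
          rw [PySem.Dict.getD_eq_get?_getD, hD (m - k) (by omega) (by omega), Option.getD_some]
          rw [show disp.toList.length - (m - k) - (disp.toList.length - (m + 1))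
              = disp.toList.length - (m + 1) + (k + 1) - (disp.toList.length - (m + 1)) from by omega]
          rw [show disp.toList.length - (m - k) = disp.toList.length - (m + 1) + (k + 1) from by omega]
          unfold pvW
          split_ifs <;> ring
    _ = pvF t disp.toList L (m + 1) (disp.toList.length - (m + 1)) := by
        rw [pvF, pv_sum_gl L m _]
        congr 1
        apply Finset.sum_congr rfl
        intro k hk
        ring

-- A's dict invariant
lemma pvA_outer (t : List String) (disp : String) (L : Int) :
    ∀ m : Nat, m ≤ disp.toList.length → ∀ k : Nat, 1 ≤ k → k ≤ m →
    ((PySem.List.pyRange (-1) (-((m : Nat) : Int) - 1) (-1)).foldl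
      (fun pos_dict i =>
        pos_dict.insert i (pvA_inner t disp L i pos_dict (i + 1)
          (if t.contains (PySem.Str.slice disp (some i) none) then 0 + 1 else 0)))
      PySem.Dict.empty).get? (-(k : Int))
    = some (pvF t disp.toList L k (disp.toList.length - k)) := by
  intro m
  induction m with
  | zero => intro _ k hk1 hk2; omega
  | succ m ih =>
    intro hm k hk1 hk2
    have happ : PySem.List.pyRange (-1) (-((m + 1 : Nat) : Int) - 1) (-1)
        = PySem.List.pyRange (-1) (-((m : Nat) : Int) - 1) (-1) ++ [-((m + 1 : Nat) : Int)] := by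
      rw [PySem.List.pyRange_neg_one_eq_reverse, PySem.List.pyRange_neg_one_eq_reverse]
      rw [show -((m + 1 : Nat) : Int) - 1 + 1 = -((m + 1 : Nat) : Int) from by ring,
        show -((m : Nat) : Int) - 1 + 1 = -((m : Nat) : Int) from by ring,
        show (-1 : Int) + 1 = 0 from by ring]
      rw [PySem.List.pyRange_one_cons (show -((m + 1 : Nat) : Int) < 0 from by push_cast; omega)]
      rw [show -((m + 1 : Nat) : Int) + 1 = -((m : Nat) : Int) from by push_cast; ring]
      rw [List.reverse_cons]
    rw [happ, List.foldl_append, List.foldl_cons, List.foldl_nil]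
    rw [PySem.Dict.get?_insert]
    by_cases hk : k = m + 1
    · subst hk
      rw [if_pos (by push_cast; ring)]
      congr 1
      exact pvA_value t disp L m hm _ (fun k' h1' h2' => ih (by omega) k' h1' (by omega))
    · rw [if_neg (by push_cast; omega)]
      exact ih (by omega) k hk1 (by omega)

-- ===== VERDICT (by name: the statement is the Claim_ definition above) =====
theorem calc_permutations_spec : Claim_equal_calc_permutations := by
  intro towels display long_towel hdom hpre
  unfold Spec_calc_permutations
  unfold Pre_calc_permutations at hpre
  have h1 : 1 ≤ display.toList.length := by
    rcases Nat.eq_zero_or_pos display.toList.length with h | h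
    · exfalso
      apply hpre
      have hnil : display.toList = [] := List.length_eq_zero_iff.mp h
      calc display = String.ofList display.toList := (String.ofList_toList).symm
        _ = "" := by rw [hnil]
    · omega
  unfold calc_permutations
  simp only [PySem.Str.len]
  rw [PySem.Dict.getD_eq_get?_getD,
    pvA_outer towels display long_towel display.toList.length le_rfl display.toList.length h1 le_rfl,
    Option.getD_some]
  rw [show display.toList.length - display.toList.length = 0 from by omega]
  rw [pvF_group towels display.toList long_towel display.toList.length 0]
  rw [pvB_eq towels display long_towel]
  apply Finset.sum_congr rfl
  intro s _
  rw [Nat.zero_add]
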